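-- pv_equiv track=rewrite | github.com/LuluBingoo/LuluBingo_Back_End | games/views.py | _board_matches_pattern
-- ===== SOURCE A (Python) =====
-- def _board_matches_pattern(
--     board: list[int],
--     called_set: set[int],
--     pattern: str,
-- ) -> bool:
--     normalized = pattern.strip().lower()
--     if len(board) != 25:
--         return False
--
--     def is_marked(value: int) -> bool:
--         return value == 0 or value in called_set
--
--     grid = [board[idx : idx + 5] for idx in range(0, 25, 5)]
--
--     if normalized == "row":
--         return any(all(is_marked(value) for value in row) for row in grid)
--
--     if normalized == "diagonal":
--         main = all(is_marked(grid[idx][idx]) for idx in range(5))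
--         anti = all(is_marked(grid[idx][4 - idx]) for idx in range(5))
--         return main or anti
--
--     return False
-- ===== SOURCE B (Python) =====
-- def _board_matches_pattern(board, called_set, pattern):
--     normalized = pattern.strip().lower()
--     if len(board) != 25 or normalized not in ("row", "diagonal"):
--         return False
--     # single flat pass accumulating one flag per row plus the two diagonal flags
--     r0 = r1 = r2 = r3 = r4 = True
--     main_ok = anti_ok = True
--     for i, value in enumerate(board):
--         marked = value == 0 or value in called_set
--         r, c = divmod(i, 5)
--         if r == 0:
--             r0 = r0 and marked
--         if r == 1:
--             r1 = r1 and marked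
--         if r == 2:
--             r2 = r2 and marked
--         if r == 3:
--             r3 = r3 and marked
--         if r == 4:
--             r4 = r4 and marked
--         if c == r:
--             main_ok = main_ok and marked
--         if c == 4 - r:
--             anti_ok = anti_ok and marked
--     if normalized == "row":
--         return r0 or r1 or r2 or r3 or r4
--     return main_ok or anti_ok
-- ===== Notes on version B (the rewrite author's own statement) =====
-- stated objective: alternative
-- what changed: B replaces A's build-a-grid-then-any/all-over-lines scan with a single flat pass over the board that accumulates five per-row flags and the two diagonal flags in one accumulator, then reads off the answer for the requested pattern.
import Mathlib
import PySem

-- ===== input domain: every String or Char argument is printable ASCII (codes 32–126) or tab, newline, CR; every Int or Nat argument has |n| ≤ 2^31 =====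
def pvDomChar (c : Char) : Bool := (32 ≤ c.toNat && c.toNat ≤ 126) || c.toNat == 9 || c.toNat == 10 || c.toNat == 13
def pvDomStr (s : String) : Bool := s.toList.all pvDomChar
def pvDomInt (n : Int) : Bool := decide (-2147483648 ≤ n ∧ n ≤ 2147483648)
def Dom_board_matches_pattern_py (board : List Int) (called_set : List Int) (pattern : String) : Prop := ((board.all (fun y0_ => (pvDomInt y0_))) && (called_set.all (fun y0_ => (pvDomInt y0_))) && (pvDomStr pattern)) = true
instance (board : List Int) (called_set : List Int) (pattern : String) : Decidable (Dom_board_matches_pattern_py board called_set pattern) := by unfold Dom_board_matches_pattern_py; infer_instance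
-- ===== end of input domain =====

-- B replaces A's build-a-grid-then-scan-winning-lines check by a single flat pass over the
-- board accumulating one flag per row plus the two diagonal flags; same return value.
-- ===== PORT A =====
def pyIsMarked (called_set : List Int) (value : Int) : Bool :=
  value == 0 || called_set.contains value

def board_matches_pattern_py (board : List Int) (called_set : List Int) (pattern : String) : Bool :=
  let normalized := PySem.Str.lower (PySem.Str.strip pattern)
  if board.length ≠ 25 then false
  else
    let grid := (PySem.List.pyRange 0 25 5).map (fun idx => PySem.List.slice board (some idx) (some (idx + 5)))
    if normalized == "row" then
      grid.any (fun row => row.all (fun value => pyIsMarked called_set value))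
    else if normalized == "diagonal" then
      -- grid[idx][idx]: indices are always in range (board has 25 cells), so the IndexError branch is unreachable
      let main := (PySem.List.pyRange 0 5 1).all (fun idx =>
        pyIsMarked called_set (PySem.List.pyGetD (PySem.List.pyGetD grid idx []) idx 0))
      let anti := (PySem.List.pyRange 0 5 1).all (fun idx =>
        pyIsMarked called_set (PySem.List.pyGetD (PySem.List.pyGetD grid idx []) (4 - idx) 0))
      main || anti
    else false

-- ===== PORT B =====
-- single flat pass over enumerate(board); the fold state is Source B's loop state (r0,r1,r2,r3,r4,main_ok,anti_ok)
def board_matches_pattern_py_alt (board : List Int) (called_set : List Int) (pattern : String) : Bool :=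
  let normalized := PySem.Str.lower (PySem.Str.strip pattern)
  if board.length ≠ 25 ∨ (normalized ≠ "row" ∧ normalized ≠ "diagonal") then false
  else
    let st := (PySem.List.enumerate board).foldl
      (fun st iv =>
        match st, iv with
        | (q0, q1, q2, q3, q4, mainOk, antiOk), (i, v) =>
          let marked := v == 0 || called_set.contains v
          let r := i.toNat / 5
          let c := i.toNat % 5
          (if r = 0 then q0 && marked else q0,
           if r = 1 then q1 && marked else q1,
           if r = 2 then q2 && marked else q2,
           if r = 3 then q3 && marked else q3,
           if r = 4 then q4 && marked else q4,
           if c = r then mainOk && marked else mainOk,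
           if c = 4 - r then antiOk && marked else antiOk))
      (true, true, true, true, true, true, true)
    if normalized == "row" then
      st.1 || st.2.1 || st.2.2.1 || st.2.2.2.1 || st.2.2.2.2.1
    else st.2.2.2.2.2.1 || st.2.2.2.2.2.2

-- ===== PRECONDITION & SPEC =====
def Spec_board_matches_pattern_py (board : List Int) (called_set : List Int) (pattern : String) (out : Bool) : Prop := out = board_matches_pattern_py_alt board called_set pattern
instance (board : List Int) (called_set : List Int) (pattern : String) (out : Bool) : Decidable (Spec_board_matches_pattern_py board called_set pattern out) := by unfold Spec_board_matches_pattern_py; infer_instance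

-- ===== CLAIM (what is proved, stated in full; the proofs are below) =====
def Claim_equal_board_matches_pattern_py : Prop := ∀ (board : List Int) (called_set : List Int) (pattern : String), Dom_board_matches_pattern_py board called_set pattern → Spec_board_matches_pattern_py board called_set pattern (board_matches_pattern_py board called_set pattern)

-- ===== LEMMAS AND PROOFS =====

theorem pvRowBridge (m0 m1 m2 m3 m4 m5 m6 m7 m8 m9 m10 m11 m12 m13 m14 m15 m16 m17 m18 m19 m20 m21 m22 m23 m24 : Bool) :
    ((m0 && (m1 && (m2 && (m3 && (m4 && true))))) || ((m5 && (m6 && (m7 && (m8 && (m9 && true))))) || ((m10 && (m11 && (m12 && (m13 && (m14 && true))))) || ((m15 && (m16 && (m17 && (m18 && (m19 && true))))) || ((m20 && (m21 && (m22 && (m23 && (m24 && true))))) || false)))))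
    = (((((((((true && m0) && m1) && m2) && m3) && m4) || (((((true && m5) && m6) && m7) && m8) && m9)) || (((((true && m10) && m11) && m12) && m13) && m14)) || (((((true && m15) && m16) && m17) && m18) && m19)) || (((((true && m20) && m21) && m22) && m23) && m24)) := by
  simp only [Bool.true_and, Bool.and_true, Bool.or_false, Bool.and_assoc, Bool.or_assoc]


theorem pvDiagBridge (n0 n4 n6 n8 n12 n16 n18 n20 n24 : Bool) :
    ((n0 && (n6 && (n12 && (n18 && (n24 && true))))) || (n4 && (n8 && (n12 && (n16 && (n20 && true))))))
    = ((((((true && n0) && n6) && n12) && n18) && n24) || (((((true && n4) && n8) && n12) && n16) && n20)) := by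
  simp only [Bool.true_and, Bool.and_true, Bool.and_assoc]


-- ===== VERDICT (by name: the statement is the Claim_ definition above) =====
theorem board_matches_pattern_py_spec : Claim_equal_board_matches_pattern_py := by
  intro board called_set pattern _
  unfold Spec_board_matches_pattern_py
  by_cases hlen : board.length = 25
  · rcases board with _ | ⟨b0, _ | ⟨b1, _ | ⟨b2, _ | ⟨b3, _ | ⟨b4, _ | ⟨b5, _ | ⟨b6, _ | ⟨b7, _ | ⟨b8, _ | ⟨b9, _ | ⟨b10, _ | ⟨b11, _ | ⟨b12, _ | ⟨b13, _ | ⟨b14, _ | ⟨b15, _ | ⟨b16, _ | ⟨b17, _ | ⟨b18, _ | ⟨b19, _ | ⟨b20, _ | ⟨b21, _ | ⟨b22, _ | ⟨b23, _ | ⟨b24, _ | ⟨t, rest⟩⟩⟩⟩⟩⟩⟩⟩⟩⟩⟩⟩⟩⟩⟩⟩⟩⟩⟩⟩⟩⟩⟩⟩⟩⟩ <;>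
      first
        | (exfalso; simp only [List.length_cons, List.length_nil] at hlen; omega)
        | (delta board_matches_pattern_py board_matches_pattern_py_alt
           generalize PySem.Str.lower (PySem.Str.strip pattern) = N
           by_cases h1 : N = "row"
           · subst h1
             exact pvRowBridge (pyIsMarked called_set b0) (pyIsMarked called_set b1) (pyIsMarked called_set b2) (pyIsMarked called_set b3) (pyIsMarked called_set b4) (pyIsMarked called_set b5) (pyIsMarked called_set b6) (pyIsMarked called_set b7) (pyIsMarked called_set b8) (pyIsMarked called_set b9) (pyIsMarked called_set b10) (pyIsMarked called_set b11) (pyIsMarked called_set b12) (pyIsMarked called_set b13) (pyIsMarked called_set b14) (pyIsMarked called_set b15) (pyIsMarked called_set b16) (pyIsMarked called_set b17) (pyIsMarked called_set b18) (pyIsMarked called_set b19) (pyIsMarked called_set b20) (pyIsMarked called_set b21) (pyIsMarked called_set b22) (pyIsMarked called_set b23) (pyIsMarked called_set b24)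
           · by_cases h2 : N = "diagonal"
             · subst h2
               exact pvDiagBridge (pyIsMarked called_set b0) (pyIsMarked called_set b4) (pyIsMarked called_set b6) (pyIsMarked called_set b8) (pyIsMarked called_set b12) (pyIsMarked called_set b16) (pyIsMarked called_set b18) (pyIsMarked called_set b20) (pyIsMarked called_set b24)
             · simp [h1, h2])
  · simp [board_matches_pattern_py, board_matches_pattern_py_alt, hlen]
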